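-- pv_equiv track=rewrite | github.com/Skollwarynz/LCSAJdump_add_BOF | lcsajdump/core/tool_runner.py | _addrs_to_nodes
-- ===== SOURCE A (Python) =====
-- def _addrs_to_nodes(tool_addrs: set[int], addr_to_node: dict) -> set[int]:
--     """
--     For each address reported by an external tool, find the LCSAJ node whose
--     address range [start, end] contains it. Returns the set of node start addrs.
--
--     External tools report the START address of a gadget. That address may fall
--     anywhere inside a LCSAJ block (not necessarily at the block boundary).
--     """
--     sorted_starts = sorted(addr_to_node.keys())
--     result: set[int] = set()
--     for addr in tool_addrs:
--         # Binary search for the largest block start ≤ addr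
--         lo, hi = 0, len(sorted_starts) - 1
--         best = None
--         while lo <= hi:
--             mid = (lo + hi) // 2
--             if sorted_starts[mid] <= addr:
--                 best = sorted_starts[mid]
--                 lo = mid + 1
--             else:
--                 hi = mid - 1
--         if best is not None:
--             node = addr_to_node[best]
--             if best <= addr <= node['end']:
--                 result.add(best)
--     return result
-- ===== SOURCE B (Python) =====
-- def _addrs_to_nodes(tool_addrs: set[int], addr_to_node: dict) -> set[int]:
--     """Sorted-merge sweep: sort the (start, node) items once, walk the sorted
--     tool addresses with a forward pointer instead of a per-address binary
--     search, record each address's containing block start, then collect the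
--     matched starts as a set."""
--     intervals = sorted(addr_to_node.items(), key=lambda kv: kv[0])
--     n = len(intervals)
--     match = {}
--     i = 0
--     cur = None
--     for addr in sorted(tool_addrs):
--         while i < n and intervals[i][0] <= addr:
--             cur = intervals[i]
--             i += 1
--         if cur is not None:
--             start, node = cur
--             if start <= addr and addr <= node['end']:
--                 match[addr] = start
--     return {match[a] for a in tool_addrs if a in match}
-- ===== Notes on version B (the rewrite author's own statement) =====
-- stated objective: alternative
-- what changed: Replaces the per-address binary search over the sorted block starts by one forward two-pointer merge: the tool addresses are sorted once and swept against the sorted (start, node) items, the pointer only ever advancing, with the matches recorded in a dict keyed by address and the result collected as a set afterwards.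
import Mathlib
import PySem

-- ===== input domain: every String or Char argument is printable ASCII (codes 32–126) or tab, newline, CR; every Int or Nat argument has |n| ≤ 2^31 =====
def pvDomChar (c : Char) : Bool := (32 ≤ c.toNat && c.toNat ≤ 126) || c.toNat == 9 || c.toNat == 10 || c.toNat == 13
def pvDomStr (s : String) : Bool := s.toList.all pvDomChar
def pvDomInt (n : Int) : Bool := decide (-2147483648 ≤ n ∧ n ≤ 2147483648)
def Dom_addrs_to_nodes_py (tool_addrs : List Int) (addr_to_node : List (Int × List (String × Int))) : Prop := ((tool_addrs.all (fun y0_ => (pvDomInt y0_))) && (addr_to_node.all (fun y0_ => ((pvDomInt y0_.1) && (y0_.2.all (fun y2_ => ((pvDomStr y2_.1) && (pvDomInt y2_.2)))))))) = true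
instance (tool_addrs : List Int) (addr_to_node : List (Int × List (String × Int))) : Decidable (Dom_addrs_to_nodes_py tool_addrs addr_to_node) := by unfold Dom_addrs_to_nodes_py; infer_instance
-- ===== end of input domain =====

-- B replaces A's per-address binary search by one forward merge of the sorted addresses
-- against the sorted (start, node) items (objective: alternative decomposition, same result).


-- ===== PORT A =====
-- the binary-search 'while lo <= hi' loop of A; fuel = |sorted_starts| + 1 always suffices
-- because hi - lo strictly shrinks each iteration
def pvBsLoop (starts : List Int) (addr : Int) : Nat → Int → Int → Option Int → Option Int
  | 0, _, _, best => best
  | fuel + 1, lo, hi, best =>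
    if lo ≤ hi then
      let mid := PySem.Int.floordiv (lo + hi) 2
      match PySem.List.pyGet? starts mid with
      | none => best        -- unreachable: 0 ≤ lo ≤ mid ≤ hi < |starts| inside the loop
      | some v =>
        if v ≤ addr then pvBsLoop starts addr fuel (mid + 1) hi (some v)
        else pvBsLoop starts addr fuel lo (mid - 1) best
    else best

def addrs_to_nodes_py (tool_addrs : List Int) (addr_to_node : List (Int × List (String × Int))) : List Int :=
  let d := PySem.Dict.ofList addr_to_node
  let sorted_starts := PySem.List.sorted d.keys (fun x => x) false
  tool_addrs.foldl (fun result addr =>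
    match pvBsLoop sorted_starts addr (sorted_starts.length + 1) 0 ((sorted_starts.length : Int) - 1) none with
    | none => result
    | some best =>
      match d.get? best with
      | none => result      -- unreachable: best is a key of the dict
      | some node =>
        -- chained 'best <= addr <= node["end"]'; missing "end" raises KeyError in Python (outside Pre_)
        if best ≤ addr then
          match (PySem.Dict.ofList node).get? "end" with
          | none => result
          | some e => if addr ≤ e then PySem.Set.add result best else result
        else result) PySem.Set.empty

-- ===== PORT B =====
-- the inner 'while i < n and intervals[i][0] <= addr' pointer advance; the index i is
-- represented by the unconsumed suffix of intervals
def pvSweepInner (addr : Int) :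
    List (Int × List (String × Int)) → Option (Int × List (String × Int)) →
    List (Int × List (String × Int)) × Option (Int × List (String × Int))
  | [], cur => ([], cur)
  | p :: rest, cur => if p.1 ≤ addr then pvSweepInner addr rest (some p) else (p :: rest, cur)

-- the outer 'for addr in sorted(tool_addrs)' loop building the match dict
def pvSweepOuter :
    List Int → List (Int × List (String × Int)) → Option (Int × List (String × Int)) →
    PySem.Dict Int Int → PySem.Dict Int Int
  | [], _, _, m => m
  | addr :: addrs, rest, cur, m =>
    let rc := pvSweepInner addr rest cur
    let m' := match rc.2 with
      | none => m
      | some p =>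
        if p.1 ≤ addr then
          match (PySem.Dict.ofList p.2).get? "end" with
          | none => m       -- KeyError in Python (outside Pre_)
          | some e => if addr ≤ e then m.insert addr p.1 else m
        else m
    pvSweepOuter addrs rc.1 rc.2 m'

def addrs_to_nodes_py_alt (tool_addrs : List Int) (addr_to_node : List (Int × List (String × Int))) : List Int :=
  let intervals := PySem.List.sorted (PySem.Dict.ofList addr_to_node).items (fun kv => kv.1) false
  let m := pvSweepOuter (PySem.List.sorted tool_addrs (fun x => x) false) intervals none PySem.Dict.empty
  tool_addrs.foldl (fun result a =>
    match m.get? a with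
    | none => result
    | some s => PySem.Set.add result s) PySem.Set.empty

-- ===== PRECONDITION & SPEC =====
-- Pre_ excludes exactly the inputs where Python raises KeyError: some tool address has a
-- predecessor block start (greatest key ≤ the address) whose node dict lacks the key "end".
def Pre_addrs_to_nodes_py (tool_addrs : List Int) (addr_to_node : List (Int × List (String × Int))) : Prop :=
  ∀ addr ∈ tool_addrs, ∀ p ∈ (PySem.Dict.ofList addr_to_node).items,
    (p.1 ≤ addr ∧ ∀ q ∈ (PySem.Dict.ofList addr_to_node).items, q.1 ≤ addr → q.1 ≤ p.1) →
    (PySem.Dict.ofList p.2).contains "end" = true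
instance (tool_addrs : List Int) (addr_to_node : List (Int × List (String × Int))) : Decidable (Pre_addrs_to_nodes_py tool_addrs addr_to_node) := by unfold Pre_addrs_to_nodes_py; infer_instance

def pvWitness_addrs_to_nodes_py : List Int × (List (Int × List (String × Int))) :=
  ([5, 11, 2], [(4, [("end", 7), ("id", 0)]), (10, [("end", 12)])])

def Spec_addrs_to_nodes_py (tool_addrs : List Int) (addr_to_node : List (Int × List (String × Int))) (out : List Int) : Prop := out = addrs_to_nodes_py_alt tool_addrs addr_to_node
instance (tool_addrs : List Int) (addr_to_node : List (Int × List (String × Int))) (out : List Int) : Decidable (Spec_addrs_to_nodes_py tool_addrs addr_to_node out) := by unfold Spec_addrs_to_nodes_py; infer_instance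

-- ===== CLAIM (what is proved, stated in full; the proofs are below) =====
def Claim_equal_addrs_to_nodes_py : Prop := ∀ (tool_addrs : List Int) (addr_to_node : List (Int × List (String × Int))), Dom_addrs_to_nodes_py tool_addrs addr_to_node → Pre_addrs_to_nodes_py tool_addrs addr_to_node → Spec_addrs_to_nodes_py tool_addrs addr_to_node (addrs_to_nodes_py tool_addrs addr_to_node)

-- ===== LEMMAS AND PROOFS =====

-- the common specification of one per-address decision: the last item (in list order)
-- whose start is ≤ addr
def pvLastLE (xs : List Int) (addr : Int) : Option Int :=
  xs.foldl (fun b s => if s ≤ addr then some s else b) none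

def pvLastLEP (ps : List (Int × List (String × Int))) (addr : Int) :
    Option (Int × List (String × Int)) :=
  ps.foldl (fun c p => if p.1 ≤ addr then some p else c) none


-- one per-address decision: the start of the last item whose start is ≤ a, if its node
-- contains the address (none also encodes "node lacks 'end'", where both ports skip)
def pvDecision (intervals : List (Int × List (String × Int))) (a : Int) : Option Int :=
  match pvLastLEP intervals a with
  | none => none
  | some p =>
    if p.1 ≤ a then
      match (PySem.Dict.ofList p.2).get? "end" with
      | none => none
      | some e => if a ≤ e then some p.1 else none
    else none

-- generic "keep the last element satisfying P" fold facts
lemma pvFoldlSel_skip {α : Type} (P : α → Prop) [DecidablePred P] (R : List α) (c : Option α)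
    (h : ∀ p ∈ R, ¬ P p) :
    R.foldl (fun c p => if P p then some p else c) c = c := by
  induction R generalizing c with
  | nil => rfl
  | cons p R ih =>
    simp only [List.foldl_cons]
    rw [if_neg (h p (by simp))]
    exact ih c (fun q hq => h q (by simp [hq]))

lemma pvFoldlSel_all {α : Type} (P : α → Prop) [DecidablePred P] (L : List α) (c : Option α)
    (h : ∀ p ∈ L, P p) :
    L.foldl (fun c p => if P p then some p else c) c = L.getLast?.or c := by
  induction L generalizing c with
  | nil => simp
  | cons p L ih =>
    simp only [List.foldl_cons]
    rw [if_pos (h p (by simp))]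
    rw [ih (some p) (fun q hq => h q (by simp [hq]))]
    cases L with
    | nil => simp
    | cons q L => simp [List.getLast?_cons]

lemma pvFoldlSel_some {α : Type} (P : α → Prop) [DecidablePred P] (L : List α) (c : Option α)
    (x : α) (h : L.foldl (fun c p => if P p then some p else c) c = some x) :
    (x ∈ L ∧ P x) ∨ c = some x := by
  induction L generalizing c with
  | nil => exact Or.inr h
  | cons p L ih =>
    simp only [List.foldl_cons] at h
    rcases ih _ h with ⟨hm, hp⟩ | hc
    · exact Or.inl ⟨by simp [hm], hp⟩
    · by_cases hP : P p
      · rw [if_pos hP] at hc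
        obtain rfl : p = x := by injection hc
        exact Or.inl ⟨by simp, hP⟩
      · rw [if_neg hP] at hc
        exact Or.inr hc

lemma pvLastLE_take_succ (xs : List Int) (addr : Int) (k : Nat) (hk : k < xs.length) :
    pvLastLE (xs.take (k + 1)) addr =
      if xs[k] ≤ addr then some xs[k] else pvLastLE (xs.take k) addr := by
  unfold pvLastLE
  rw [List.take_add_one, List.getElem?_eq_getElem hk]
  rw [Option.toList_some, List.foldl_append, List.foldl_cons, List.foldl_nil]

-- the binary-search loop of A computes the last start ≤ addr
lemma pvBsLoop_eq (xs : List Int) (addr : Int) (hs : xs.Pairwise (· ≤ ·)) :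
    ∀ (fuel : Nat) (lo hi : Int) (best : Option Int),
      0 ≤ lo → hi < (xs.length : Int) →
      (hi + 1 - lo).toNat < fuel →
      best = pvLastLE (xs.take lo.toNat) addr →
      (∀ (j : Nat) (hj : j < xs.length), hi < (j : Int) → addr < xs[j]'hj) →
      pvBsLoop xs addr fuel lo hi best = pvLastLE xs addr := by
  intro fuel
  induction fuel with
  | zero => intro lo hi best _ _ hf _ _; omega
  | succ fuel ih =>
    intro lo hi best hlo hhi hf hbest hsuf
    simp only [pvBsLoop]
    by_cases hcmp : lo ≤ hi
    · rw [if_pos hcmp]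
      obtain ⟨hm1, hm2⟩ := PySem.Int.floordiv_two_mid_bounds hcmp
      set mid := PySem.Int.floordiv (lo + hi) 2 with hmid
      have hmn : mid.toNat < xs.length := by omega
      have hget : PySem.List.pyGet? xs mid = some (xs[mid.toNat]'hmn) := by
        have h0 := PySem.List.pyGet?_ofNat xs mid.toNat hmn
        rwa [Int.toNat_of_nonneg (by omega)] at h0
      rw [hget]
      by_cases hv : xs[mid.toNat]'hmn ≤ addr
      · simp only [if_pos hv]
        apply ih (mid + 1) hi (some (xs[mid.toNat]'hmn)) (by omega) hhi (by omega) ?_ hsuf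
        have h1 : (mid + 1).toNat = mid.toNat + 1 := by omega
        rw [h1, pvLastLE_take_succ xs addr mid.toNat hmn, if_pos hv]
      · simp only [if_neg hv]
        apply ih lo (mid - 1) best hlo (by omega) (by omega) hbest ?_
        intro j hj2 hj1
        by_cases hjh : hi < (j : Int)
        · exact hsuf j hj2 hjh
        · have hmj : mid.toNat ≤ j := by omega
          have hmono : xs[mid.toNat]'hmn ≤ xs[j]'hj2 := by
            rcases Nat.lt_or_ge mid.toNat j with h' | h'
            · exact (List.pairwise_iff_getElem.mp hs) _ _ hmn hj2 h'
            · have hje : mid.toNat = j := by omega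
              subst hje; exact le_refl _
          omega
    · rw [if_neg hcmp]
      rw [hbest]
      have hx : pvLastLE xs addr = pvLastLE (xs.take lo.toNat) addr := by
        conv_lhs => rw [← List.take_append_drop lo.toNat xs]
        unfold pvLastLE
        rw [List.foldl_append]
        apply pvFoldlSel_skip (fun s => s ≤ addr)
        intro s hsm
        obtain ⟨j, hj, rfl⟩ := List.mem_iff_getElem.mp hsm
        rw [List.getElem_drop]
        have hjl : j < xs.length - lo.toNat := by simpa using hj
        have := hsuf (lo.toNat + j) (by omega) (by omega)
        omega
      exact hx.symm

-- the inner pointer advance consumes exactly a prefix of items with start ≤ addr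
lemma pvSweepInner_spec (addr : Int) :
    ∀ (rest consumed : List (Int × List (String × Int))),
      rest.Pairwise (fun p q => p.1 ≤ q.1) →
      ∃ taken rest',
        pvSweepInner addr rest consumed.getLast? = (rest', (consumed ++ taken).getLast?) ∧
        rest = taken ++ rest' ∧ (∀ p ∈ taken, p.1 ≤ addr) ∧ (∀ p ∈ rest', ¬ p.1 ≤ addr) := by
  intro rest
  induction rest with
  | nil =>
    intro consumed _
    exact ⟨[], [], by simp [pvSweepInner], by simp, by simp, by simp⟩
  | cons p rest ih =>
    intro consumed hpw
    by_cases hp : p.1 ≤ addr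
    · obtain ⟨taken, rest', heq, hsplit, htk, hrest⟩ := ih (consumed ++ [p]) hpw.of_cons
      refine ⟨p :: taken, rest', ?_, by simp [hsplit], ?_, hrest⟩
      · rw [pvSweepInner, if_pos hp]
        have hlast : (consumed ++ [p]).getLast? = some p := by simp
        rw [← hlast, heq]
        have : consumed ++ [p] ++ taken = consumed ++ (p :: taken) := by simp
        rw [this]
      · intro q hq
        rcases List.mem_cons.mp hq with rfl | hq
        · exact hp
        · exact htk q hq
    · refine ⟨[], p :: rest, ?_, by simp, by simp, ?_⟩
      · rw [pvSweepInner, if_neg hp]; simp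
      · intro q hq
        rcases List.mem_cons.mp hq with rfl | hq
        · exact hp
        · have h1 := (List.pairwise_cons.mp hpw).1 q hq
          intro hle
          exact hp (le_trans h1 hle)

-- the outer sweep's match dict answers pvDecision for every swept address
lemma pvSweepOuter_get? (intervals : List (Int × List (String × Int)))
    (hI : intervals.Pairwise (fun p q => p.1 ≤ q.1)) :
    ∀ (addrs : List Int) (consumed rest : List (Int × List (String × Int)))
      (m : PySem.Dict Int Int) (a : Int),
      intervals = consumed ++ rest →
      (∀ p ∈ consumed, ∀ x ∈ addrs, p.1 ≤ x) →
      addrs.Pairwise (· ≤ ·) →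
      (pvSweepOuter addrs rest consumed.getLast? m).get? a =
        if a ∈ addrs then
          match pvDecision intervals a with
          | some s => some s
          | none => m.get? a
        else m.get? a := by
  intro addrs
  induction addrs with
  | nil => intro consumed rest m a _ _ _; simp [pvSweepOuter]
  | cons addr addrs ih =>
    intro consumed rest m a hsplit hcons haddrs
    have hrestpw : rest.Pairwise (fun p q => p.1 ≤ q.1) :=
      (List.pairwise_append.mp (hsplit ▸ hI)).2.1
    obtain ⟨taken, rest', heq, hsplit2, htk, hrest'⟩ := pvSweepInner_spec addr rest consumed hrestpw
    have hall : ∀ p ∈ consumed ++ taken, p.1 ≤ addr := by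
      intro p hpm
      rcases List.mem_append.mp hpm with h | h
      · exact hcons p h addr (by simp)
      · exact htk p h
    have hs0 : ∀ c, rest'.foldl (fun c p => if p.1 ≤ addr then some p else c) c = c := fun c => by
      simpa using pvFoldlSel_skip (fun p : Int × List (String × Int) => p.1 ≤ addr) rest' c hrest'
    have hs1 : (consumed ++ taken).foldl (fun c p => if p.1 ≤ addr then some p else c) none =
        (consumed ++ taken).getLast? := by
      have h0 := pvFoldlSel_all (fun p : Int × List (String × Int) => p.1 ≤ addr)
        (consumed ++ taken) none hall
      simpa using h0
    have hDec : pvLastLEP intervals addr = (consumed ++ taken).getLast? := by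
      rw [hsplit, hsplit2, ← List.append_assoc]
      unfold pvLastLEP
      rw [List.foldl_append, hs1, hs0]
    rw [pvSweepOuter, heq]
    have hm' :
        (match (consumed ++ taken).getLast? with
          | none => m
          | some p =>
            if p.1 ≤ addr then
              match (PySem.Dict.ofList p.2).get? "end" with
              | none => m
              | some e => if addr ≤ e then m.insert addr p.1 else m
            else m) =
        (match pvDecision intervals addr with
          | some s => m.insert addr s
          | none => m) := by
      unfold pvDecision
      rw [hDec]
      cases hc : (consumed ++ taken).getLast? with
      | none => rfl
      | some p =>
        have hple : p.1 ≤ addr := hall p (List.mem_of_getLast? hc)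
        cases hend : (PySem.Dict.ofList p.2).get? "end" with
        | none => simp [hple, hend]
        | some e => by_cases he : addr ≤ e <;> simp [hple, hend, he]
    rw [hm']
    have hmono : ∀ x ∈ addrs, addr ≤ x := fun x hx => (List.pairwise_cons.mp haddrs).1 x hx
    rw [ih (consumed ++ taken) rest' _ a (by rw [hsplit, hsplit2, List.append_assoc])
        (fun p hpm x hx => le_trans (hall p hpm) (hmono x hx)) haddrs.of_cons]
    have hgm : ∀ x : Int,
        (match pvDecision intervals addr with
          | some s => m.insert addr s
          | none => m).get? x =
        if x = addr then
          (match pvDecision intervals addr with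
            | some s => some s
            | none => m.get? x)
        else m.get? x := by
      intro x
      cases hd : pvDecision intervals addr with
      | none => simp
      | some s => rw [PySem.Dict.get?_insert]
    by_cases hmem : a ∈ addrs
    · rw [if_pos hmem, if_pos (by simp [hmem])]
      cases hd : pvDecision intervals a with
      | some s => rfl
      | none =>
        rw [hgm a]
        by_cases haa : a = addr
        · subst haa; rw [hd]; simp
        · rw [if_neg haa]
    · rw [if_neg hmem]
      by_cases haa : a = addr
      · subst haa
        rw [if_pos (by simp), hgm a, if_pos rfl]
      · rw [if_neg (by simp [haa, hmem]), hgm a, if_neg haa]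

-- pvLastLE on the firsts is the first of pvLastLEP
lemma pvLastLE_map_fst (ps : List (Int × List (String × Int))) (a : Int) :
    ∀ c : Option (Int × List (String × Int)),
      (ps.map (fun p => p.1)).foldl (fun b s => if s ≤ a then some s else b) (c.map (fun p => p.1)) =
        (ps.foldl (fun c p => if p.1 ≤ a then some p else c) c).map (fun p => p.1) := by
  induction ps with
  | nil => intro c; rfl
  | cons p ps ih =>
    intro c
    simp only [List.map_cons, List.foldl_cons]
    by_cases h : p.1 ≤ a
    · rw [if_pos h, if_pos h]
      exact ih (some p)
    · rw [if_neg h, if_neg h]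
      exact ih c

lemma pvLastLE_eq_map (ps : List (Int × List (String × Int))) (a : Int) :
    pvLastLE (ps.map (fun p => p.1)) a = (pvLastLEP ps a).map (fun p => p.1) :=
  pvLastLE_map_fst ps a none

-- A's sorted key list is the firsts of B's sorted items
lemma pvSortedStarts_eq (l : List (Int × List (String × Int))) :
    PySem.List.sorted (PySem.Dict.ofList l).keys (fun x => x) false =
      (PySem.List.sorted (PySem.Dict.ofList l).items (fun kv => kv.1) false).map (fun p => p.1) := by
  have hperm :
      ((PySem.List.sorted (PySem.Dict.ofList l).items (fun kv => kv.1) false).map (fun p => p.1)).Perm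
        (PySem.Dict.ofList l).keys :=
    (PySem.List.sorted_perm (PySem.Dict.ofList l).items (fun kv => kv.1) false).map (fun p => p.1)
  have hle := PySem.List.sorted_map_key_pairwise (PySem.Dict.ofList l).items (fun kv => kv.1)
  have hnd : ((PySem.List.sorted (PySem.Dict.ofList l).items (fun kv => kv.1) false).map (fun p => p.1)).Nodup :=
    hperm.nodup_iff.mpr (PySem.Dict.nodup_keys_ofList l)
  have hne : ((PySem.List.sorted (PySem.Dict.ofList l).items (fun kv => kv.1) false).map (fun p => p.1)).Pairwise (fun a b => a ≠ b) := hnd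
  exact PySem.List.sorted_eq_of_perm_of_pairwise_lt _ _ (fun x => x) hperm
    ((hle.and hne).imp (fun h => lt_of_le_of_ne h.1 h.2))

-- fold-step congruence over the addresses
lemma pvFoldl_congr (l : List Int) (F G : List Int → Int → List Int) (acc : List Int)
    (h : ∀ r a, a ∈ l → F r a = G r a) : l.foldl F acc = l.foldl G acc := by
  induction l generalizing acc with
  | nil => rfl
  | cons x l ih =>
    simp only [List.foldl_cons]
    rw [h acc x (by simp)]
    exact ih _ (fun r a ha => h r a (by simp [ha]))

-- A's per-address step is the pvDecision step
lemma pvStepA_eq (l : List (Int × List (String × Int))) (a : Int) (result : List Int) :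
    (match pvBsLoop (PySem.List.sorted (PySem.Dict.ofList l).keys (fun x => x) false) a
        ((PySem.List.sorted (PySem.Dict.ofList l).keys (fun x => x) false).length + 1) 0
        (((PySem.List.sorted (PySem.Dict.ofList l).keys (fun x => x) false).length : Int) - 1) none with
      | none => result
      | some best =>
        match (PySem.Dict.ofList l).get? best with
        | none => result
        | some node =>
          if best ≤ a then
            match (PySem.Dict.ofList node).get? "end" with
            | none => result
            | some e => if a ≤ e then PySem.Set.add result best else result
          else result) =
    (match pvDecision (PySem.List.sorted (PySem.Dict.ofList l).items (fun kv => kv.1) false) a with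
      | none => result
      | some s => PySem.Set.add result s) := by
  set intervals := PySem.List.sorted (PySem.Dict.ofList l).items (fun kv => kv.1) false with hi
  have hss := pvSortedStarts_eq l
  have hpw : (intervals.map (fun p => p.1)).Pairwise (· ≤ ·) :=
    PySem.List.sorted_map_key_pairwise (PySem.Dict.ofList l).items (fun kv => kv.1)
  have hbs : pvBsLoop (intervals.map (fun p => p.1)) a
      ((intervals.map (fun p => p.1)).length + 1) 0
      (((intervals.map (fun p => p.1)).length : Int) - 1) none =
      pvLastLE (intervals.map (fun p => p.1)) a := by
    apply pvBsLoop_eq _ _ hpw _ _ _ _ (by omega) (by omega) (by omega) rfl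
    intro j hj hlt
    omega
  rw [hss, hbs, pvLastLE_eq_map]
  cases hp : pvLastLEP intervals a with
  | none => simp [pvDecision, hp]
  | some p =>
    have hmem : p ∈ intervals :=
      ((pvFoldlSel_some (fun q : Int × List (String × Int) => q.1 ≤ a) intervals none p
        (by simpa [pvLastLEP] using hp)).resolve_right (by simp)).1
    have hmemi : (p.1, p.2) ∈ (PySem.Dict.ofList l).items := by
      have := (PySem.List.mem_sorted (PySem.Dict.ofList l).items (fun kv => kv.1) false p).mp (hi ▸ hmem)
      simpa using this
    have hget : (PySem.Dict.ofList l).get? p.1 = some p.2 :=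
      PySem.Dict.get?_of_mem_items _ hmemi (PySem.Dict.nodup_keys_ofList l)
    unfold pvDecision
    rw [hp]
    dsimp only [Option.map_some]
    rw [hget]
    by_cases hle : p.1 ≤ a
    · cases hend : (PySem.Dict.ofList p.2).get? "end" with
      | none => simp [hle, hend]
      | some e => by_cases he : a ≤ e <;> simp [hle, hend, he]
    · simp [hle]

-- B's match dict answers the pvDecision for every tool address
lemma pvStepB_eq (tool_addrs : List Int) (l : List (Int × List (String × Int))) (a : Int)
    (ha : a ∈ tool_addrs) :
    (pvSweepOuter (PySem.List.sorted tool_addrs (fun x => x) false)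
        (PySem.List.sorted (PySem.Dict.ofList l).items (fun kv => kv.1) false) none
        PySem.Dict.empty).get? a =
      pvDecision (PySem.List.sorted (PySem.Dict.ofList l).items (fun kv => kv.1) false) a := by
  set intervals := PySem.List.sorted (PySem.Dict.ofList l).items (fun kv => kv.1) false with hi
  have hIpw : intervals.Pairwise (fun p q => p.1 ≤ q.1) :=
    PySem.List.sorted_pairwise (PySem.Dict.ofList l).items (fun kv => kv.1)
  have h0 := pvSweepOuter_get? intervals hIpw (PySem.List.sorted tool_addrs (fun x => x) false)
    [] intervals PySem.Dict.empty a rfl (by simp)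
    (PySem.List.sorted_pairwise tool_addrs (fun x => x))
  have hmem : a ∈ PySem.List.sorted tool_addrs (fun x => x) false :=
    (PySem.List.mem_sorted tool_addrs (fun x => x) false a).mpr ha
  rw [if_pos hmem] at h0
  have h1 : (([] : List (Int × List (String × Int))).getLast? :
      Option (Int × List (String × Int))) = none := rfl
  rw [h1] at h0
  rw [h0]
  cases hd : pvDecision intervals a with
  | none => simp
  | some s => rfl

-- ===== VERDICT (by name: the statement is the Claim_ definition above) =====
theorem addrs_to_nodes_py_spec : Claim_equal_addrs_to_nodes_py := by
  unfold Claim_equal_addrs_to_nodes_py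
  intro tool_addrs addr_to_node _ _
  unfold Spec_addrs_to_nodes_py
  unfold addrs_to_nodes_py addrs_to_nodes_py_alt
  apply pvFoldl_congr
  intro r a ha
  dsimp only
  rw [pvStepA_eq, pvStepB_eq tool_addrs addr_to_node a ha]
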